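-- pv_equiv track=rewrite | github.com/musicai-cakecake/pop-diffuseq | music-representation/midi_quantize.py | pitch_time_duration_limit_detect
-- ===== SOURCE A (Python) =====
-- def pitch_time_duration_limit_detect(music_seq, pitch_threshold, rest_threshold, duration_threshold, len_threshold=61):
--     had_rest = False
--     had_low_pitch = False
--     had_long_duration = False
--     had_short_len = False
--     for event in music_seq:
--         if event[1] > rest_threshold:
--             had_rest = True
--         if event[0] != '0_CHORD' and pitch_threshold[0] > event[2] > pitch_threshold[1]:
--             had_low_pitch = True
--         if event[0] != '0_CHORD' and event[3] > duration_threshold: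
--             had_long_duration = True
--     if len(music_seq) < len_threshold:
--         had_short_len = True
--     return had_rest, had_low_pitch, had_long_duration, had_short_len
-- ===== SOURCE B (Python) =====
-- def pitch_time_duration_limit_detect(music_seq, pitch_threshold, rest_threshold, duration_threshold, len_threshold=61):
--     # Aggregate formulation: each flag is a comparison of one extremum (max/min
--     # with a neutral default) of a projected/filtered sequence against its
--     # threshold, instead of a flag-accumulating loop.
--     notes = [e for e in music_seq if e[0] != '0_CHORD']
--     had_rest = max((e[1] for e in music_seq), default=rest_threshold) > rest_threshold
--     had_low_pitch = min((e[2] for e in notes if e[2] > pitch_threshold[1]),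
--                         default=pitch_threshold[0]) < pitch_threshold[0]
--     had_long_duration = max((e[3] for e in notes), default=duration_threshold) > duration_threshold
--     had_short_len = len(music_seq) < len_threshold
--     return had_rest, had_low_pitch, had_long_duration, had_short_len
-- ===== Notes on version B (the rewrite author's own statement) =====
-- stated objective: alternative
-- what changed: Replaces the flag-accumulating loop with an extremum formulation: each flag becomes a threshold comparison of a max/min aggregate (with a neutral default) over a projected/filtered sequence.
import Mathlib
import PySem

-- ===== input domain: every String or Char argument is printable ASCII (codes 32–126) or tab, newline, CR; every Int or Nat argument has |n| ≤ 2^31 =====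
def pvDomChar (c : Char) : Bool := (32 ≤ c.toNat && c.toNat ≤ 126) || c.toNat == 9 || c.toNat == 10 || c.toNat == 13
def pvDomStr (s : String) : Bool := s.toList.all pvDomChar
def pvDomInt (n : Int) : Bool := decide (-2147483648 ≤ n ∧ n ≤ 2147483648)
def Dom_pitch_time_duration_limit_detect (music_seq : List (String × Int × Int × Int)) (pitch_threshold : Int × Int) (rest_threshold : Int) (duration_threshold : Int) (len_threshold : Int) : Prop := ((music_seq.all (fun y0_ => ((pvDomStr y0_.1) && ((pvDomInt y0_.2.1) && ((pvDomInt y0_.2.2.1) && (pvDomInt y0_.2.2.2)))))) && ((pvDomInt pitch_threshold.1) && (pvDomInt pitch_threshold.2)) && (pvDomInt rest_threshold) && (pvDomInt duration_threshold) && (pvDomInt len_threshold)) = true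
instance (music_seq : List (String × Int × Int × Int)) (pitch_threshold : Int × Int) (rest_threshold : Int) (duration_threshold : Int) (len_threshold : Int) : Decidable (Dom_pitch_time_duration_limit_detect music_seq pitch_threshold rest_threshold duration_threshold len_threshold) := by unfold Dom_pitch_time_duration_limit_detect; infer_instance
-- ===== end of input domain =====

-- ===== PORT A =====
-- A: one loop accumulating four flags; B: each flag is a threshold comparison of a
-- max/min aggregate (with a neutral default) over a projected/filtered sequence.
def pitch_time_duration_limit_detect (music_seq : List (String × Int × Int × Int)) (pitch_threshold : Int × Int) (rest_threshold : Int) (duration_threshold : Int) (len_threshold : Int) : Bool × Bool × Bool × Bool :=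
  let st := music_seq.foldl (fun (st : Bool × Bool × Bool) event =>
    let had_rest := if event.2.1 > rest_threshold then true else st.1
    let had_low_pitch := if event.1 ≠ "0_CHORD" ∧ pitch_threshold.1 > event.2.2.1 ∧ event.2.2.1 > pitch_threshold.2 then true else st.2.1
    let had_long_duration := if event.1 ≠ "0_CHORD" ∧ event.2.2.2 > duration_threshold then true else st.2.2
    (had_rest, had_low_pitch, had_long_duration)) (false, false, false)
  let had_short_len := if (music_seq.length : Int) < len_threshold then true else false
  (st.1, st.2.1, st.2.2, had_short_len)

-- ===== PORT B =====
-- Python's max(xs, default=d) / min(xs, default=d): default on empty, else the extremum.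
def pvMaxD (xs : List Int) (d : Int) : Int :=
  match xs with
  | [] => d
  | h :: t => t.foldl max h

def pvMinD (xs : List Int) (d : Int) : Int :=
  match xs with
  | [] => d
  | h :: t => t.foldl min h

def pitch_time_duration_limit_detect_alt (music_seq : List (String × Int × Int × Int)) (pitch_threshold : Int × Int) (rest_threshold : Int) (duration_threshold : Int) (len_threshold : Int) : Bool × Bool × Bool × Bool :=
  let notes := music_seq.filter (fun e => e.1 ≠ "0_CHORD")
  let had_rest := decide (pvMaxD (music_seq.map (fun e => e.2.1)) rest_threshold > rest_threshold)
  let had_low_pitch := decide (pvMinD ((notes.filter (fun e => e.2.2.1 > pitch_threshold.2)).map (fun e => e.2.2.1)) pitch_threshold.1 < pitch_threshold.1)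
  let had_long_duration := decide (pvMaxD (notes.map (fun e => e.2.2.2)) duration_threshold > duration_threshold)
  let had_short_len := decide ((music_seq.length : Int) < len_threshold)
  (had_rest, had_low_pitch, had_long_duration, had_short_len)

-- ===== PRECONDITION & SPEC =====
def Spec_pitch_time_duration_limit_detect (music_seq : List (String × Int × Int × Int)) (pitch_threshold : Int × Int) (rest_threshold : Int) (duration_threshold : Int) (len_threshold : Int) (out : Bool × Bool × Bool × Bool) : Prop := out = pitch_time_duration_limit_detect_alt music_seq pitch_threshold rest_threshold duration_threshold len_threshold
instance (music_seq : List (String × Int × Int × Int)) (pitch_threshold : Int × Int) (rest_threshold : Int) (duration_threshold : Int) (len_threshold : Int) (out : Bool × Bool × Bool × Bool) : Decidable (Spec_pitch_time_duration_limit_detect music_seq pitch_threshold rest_threshold duration_threshold len_threshold out) := by unfold Spec_pitch_time_duration_limit_detect; infer_instance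

-- ===== CLAIM (what is proved, stated in full; the proofs are below) =====
def Claim_equal_pitch_time_duration_limit_detect : Prop := ∀ (music_seq : List (String × Int × Int × Int)) (pitch_threshold : Int × Int) (rest_threshold : Int) (duration_threshold : Int) (len_threshold : Int), Dom_pitch_time_duration_limit_detect music_seq pitch_threshold rest_threshold duration_threshold len_threshold → Spec_pitch_time_duration_limit_detect music_seq pitch_threshold rest_threshold duration_threshold len_threshold (pitch_time_duration_limit_detect music_seq pitch_threshold rest_threshold duration_threshold len_threshold)

-- ===== LEMMAS AND PROOFS =====
-- A's fold equals three independent any-scans.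
theorem pv_fold_any (music_seq : List (String × Int × Int × Int)) (pitch_threshold : Int × Int) (rest_threshold : Int) (duration_threshold : Int) (st : Bool × Bool × Bool) :
    music_seq.foldl (fun (st : Bool × Bool × Bool) event =>
      let had_rest := if event.2.1 > rest_threshold then true else st.1
      let had_low_pitch := if event.1 ≠ "0_CHORD" ∧ pitch_threshold.1 > event.2.2.1 ∧ event.2.2.1 > pitch_threshold.2 then true else st.2.1
      let had_long_duration := if event.1 ≠ "0_CHORD" ∧ event.2.2.2 > duration_threshold then true else st.2.2
      (had_rest, had_low_pitch, had_long_duration)) st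
    = (st.1 || music_seq.any (fun e => e.2.1 > rest_threshold),
       st.2.1 || music_seq.any (fun e => e.1 ≠ "0_CHORD" && decide (pitch_threshold.1 > e.2.2.1) && decide (e.2.2.1 > pitch_threshold.2)),
       st.2.2 || music_seq.any (fun e => e.1 ≠ "0_CHORD" && decide (e.2.2.2 > duration_threshold))) := by
  induction music_seq generalizing st with
  | nil => simp
  | cons e tl ih =>
    simp only [List.foldl_cons, List.any_cons, ih]
    obtain ⟨s1, s2, s3⟩ := st
    simp only []
    congr 1
    · split_ifs with h <;> simp [h]
    congr 1
    · split_ifs with h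
      · simp [h.1, h.2.1, h.2.2]
      · rcases not_and_or.mp h with h1 | h2
        · simp at h1; simp [h1]
        · rcases not_and_or.mp h2 with h3 | h4
          · simp [h3]
          · simp [h4]
    · split_ifs with h
      · simp [h.1, h.2]
      · rcases not_and_or.mp h with h1 | h2
        · simp at h1; simp [h1]
        · simp [h2]

theorem pv_foldl_max_gt (t : List Int) (acc r : Int) :
    (decide (r < t.foldl max acc)) = (decide (r < acc) || t.any (fun x => decide (r < x))) := by
  induction t generalizing acc with
  | nil => simp
  | cons a t ih =>
    rw [List.foldl_cons, ih, List.any_cons, ← Bool.or_assoc]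
    congr 1
    by_cases h1 : r < acc <;> by_cases h2 : r < a <;>
      simp [h1, h2]

theorem pv_maxD_gt (xs : List Int) (r : Int) :
    (decide (r < pvMaxD xs r)) = xs.any (fun x => decide (r < x)) := by
  cases xs with
  | nil => simp [pvMaxD]
  | cons h t =>
    show decide (r < t.foldl max h) = _
    rw [pv_foldl_max_gt, List.any_cons]

theorem pv_foldl_min_lt (t : List Int) (acc r : Int) :
    (decide (t.foldl min acc < r)) = (decide (acc < r) || t.any (fun x => decide (x < r))) := by
  induction t generalizing acc with
  | nil => simp
  | cons a t ih =>
    rw [List.foldl_cons, ih, List.any_cons, ← Bool.or_assoc]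
    congr 1
    by_cases h1 : acc < r <;> by_cases h2 : a < r <;>
      simp [h1, h2]

theorem pv_minD_lt (xs : List Int) (r : Int) :
    (decide (pvMinD xs r < r)) = xs.any (fun x => decide (x < r)) := by
  cases xs with
  | nil => simp [pvMinD]
  | cons h t =>
    show decide (t.foldl min h < r) = _
    rw [pv_foldl_min_lt, List.any_cons]

-- ===== VERDICT (by name: the statement is the Claim_ definition above) =====
theorem pitch_time_duration_limit_detect_spec : Claim_equal_pitch_time_duration_limit_detect := by
  intro music_seq pt rt dt lt _
  unfold Spec_pitch_time_duration_limit_detect pitch_time_duration_limit_detect pitch_time_duration_limit_detect_alt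
  simp only [pv_fold_any, Bool.false_or, pv_maxD_gt, pv_minD_lt, List.any_map, List.any_filter,
    Function.comp_def]
  refine Prod.ext ?_ (Prod.ext ?_ (Prod.ext ?_ ?_))
  · rfl
  · simp only []
    congr 1
    funext e
    by_cases h1 : e.1 = "0_CHORD" <;> by_cases h2 : pt.1 > e.2.2.1 <;> by_cases h3 : e.2.2.1 > pt.2 <;>
      simp [h1, h2, h3]
  · rfl
  · split_ifs with h <;> simp [h]
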